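-- pv_equiv track=rewrite | github.com/KAMRANKHANALWI/Graph | code/3_algorithms/path_finding.py | dfs_find_any_path
-- ===== SOURCE A (Python) =====
-- def dfs_find_any_path(graph, start, target, path=None):
--     """
--     Find ANY path using DFS (not necessarily shortest)
--     Uses recursion and backtracking
--     """
--     if path is None:
--         path = []
--
--     path = path + [start]
--
--     # Found the target!
--     if start == target:
--         return path
--
--     # Try each neighbor
--     for neighbor in graph.get(start, []):
--         if neighbor not in path:  # Avoid cycles
--             new_path = dfs_find_any_path(graph, neighbor, target, path)
--             if new_path:  # Found a path through this neighbor
--                 return new_path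
--
--     # No path found through any neighbor
--     return None
-- ===== SOURCE B (Python) =====
-- def dfs_find_any_path(graph, start, target, path=None):
--     """Iterative backtracking DFS: one shared current path plus a stack of
--     pending-neighbor lists (no recursion, no per-call path copies)."""
--     cur = (list(path) if path else []) + [start]
--     if start == target:
--         return cur
--     pending = [list(graph.get(start, []))]
--     while pending:
--         ns = pending[-1]
--         if not ns:
--             pending.pop()
--             cur.pop()
--             continue
--         n = ns.pop(0)
--         if n in cur:
--             continue
--         cur.append(n)
--         if n == target:
--             return cur
--         pending.append(list(graph.get(n, [])))
--     return None
-- ===== Notes on version B (the rewrite author's own statement) =====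
-- stated objective: alternative
-- what changed: Replaced the recursive backtracking DFS (a fresh path list per call) by an iterative loop over a single shared current-path list plus an explicit stack of pending-neighbor lists, backtracking by popping both; same returned path.
import Mathlib
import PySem

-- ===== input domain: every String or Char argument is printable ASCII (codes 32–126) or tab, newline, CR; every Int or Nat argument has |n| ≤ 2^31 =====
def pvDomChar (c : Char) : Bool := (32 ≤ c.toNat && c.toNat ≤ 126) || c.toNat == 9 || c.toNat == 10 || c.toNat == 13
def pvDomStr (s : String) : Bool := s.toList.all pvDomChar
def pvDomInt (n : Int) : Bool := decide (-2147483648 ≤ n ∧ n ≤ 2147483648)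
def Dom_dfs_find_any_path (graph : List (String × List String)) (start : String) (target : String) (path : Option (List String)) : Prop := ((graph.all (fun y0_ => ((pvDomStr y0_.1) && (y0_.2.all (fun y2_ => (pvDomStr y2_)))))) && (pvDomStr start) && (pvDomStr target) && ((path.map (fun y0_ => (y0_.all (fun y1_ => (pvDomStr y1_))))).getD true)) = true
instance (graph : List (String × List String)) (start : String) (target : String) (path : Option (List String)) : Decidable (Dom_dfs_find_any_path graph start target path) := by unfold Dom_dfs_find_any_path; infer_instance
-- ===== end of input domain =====

-- B replaces A's recursive backtracking DFS (fresh path list per call) by an iterative loop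
-- over ONE shared current-path list plus an explicit stack of pending-neighbor lists,
-- backtracking by popping both; same return value, objective: alternative decomposition.

-- ===== PORT A =====
-- graph.get(k, [])  (dict lookup with default)
def pvGet (graph : List (String × List String)) (k : String) : List String :=
  PySem.Dict.getD (PySem.Dict.mk graph) k []

-- all node names occurring in the dict (keys and adjacency lists); used only for termination
def pvNodes (graph : List (String × List String)) : List String :=
  graph.flatMap (fun kv => kv.1 :: kv.2)

-- termination measure of one recursive call: how many graph nodes are not yet on the path
def pvMu (graph : List (String × List String)) (p : List String) : Nat :=
  ((pvNodes graph).filter (fun x => x ∉ p)).length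

theorem pv_filter_len_le {α : Type} (P Q : α → Bool) (h : ∀ x, Q x = true → P x = true) :
    ∀ l : List α, (l.filter Q).length ≤ (l.filter P).length := by
  intro l
  induction l with
  | nil => simp
  | cons x xs ih =>
    by_cases hq : Q x = true
    · simp [hq, h x hq]; omega
    · simp only [List.filter_cons]
      rw [Bool.not_eq_true] at hq
      rw [hq]
      simp only [Bool.false_eq_true, if_false]
      by_cases hp : P x = true
      · simp [hp]; omega
      · rw [Bool.not_eq_true] at hp
        rw [hp]; simpa using ih

theorem pv_filter_len_lt {α : Type} (P Q : α → Bool) (h : ∀ x, Q x = true → P x = true)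
    {a : α} {l : List α} (ha : a ∈ l) (hP : P a = true) (hQ : Q a = false) :
    (l.filter Q).length < (l.filter P).length := by
  induction l with
  | nil => cases ha
  | cons x xs ih =>
    rcases List.mem_cons.mp ha with rfl | hmem
    · rw [List.filter_cons, List.filter_cons, hP, hQ]
      simp only [if_true, Bool.false_eq_true, if_false, List.length_cons]
      exact Nat.lt_succ_of_le (pv_filter_len_le P Q h xs)
    · have := ih hmem
      by_cases hq : Q x = true
      · simp only [List.filter_cons, hq, h x hq, if_true, List.length_cons]; omega
      · rw [Bool.not_eq_true] at hq
        rw [List.filter_cons, List.filter_cons, hq]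
        simp only [Bool.false_eq_true, if_false]
        by_cases hp : P x = true
        · simp only [hp, if_true, List.length_cons]; omega
        · rw [Bool.not_eq_true] at hp; rw [hp]
          simpa using this

theorem pvGet_cons (k1 : String) (v1 : List String) (g : List (String × List String)) (k : String) :
    pvGet ((k1, v1) :: g) k = if k1 == k then v1 else pvGet g k := by
  rw [pvGet, PySem.Dict.getD_eq_get?_getD, PySem.Dict.get?_mk_cons]
  by_cases he : k1 == k
  · simp [he]
  · rw [Bool.not_eq_true] at he
    simp [he, pvGet, PySem.Dict.getD_eq_get?_getD]

theorem pvNodes_cons (k1 : String) (v1 : List String) (g : List (String × List String)) :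
    pvNodes ((k1, v1) :: g) = (k1 :: v1) ++ pvNodes g := by
  simp [pvNodes, List.flatMap_cons]

theorem pv_mem_pvGet {graph : List (String × List String)} {k n : String}
    (h : n ∈ pvGet graph k) : n ∈ pvNodes graph := by
  induction graph with
  | nil => simp [pvGet, PySem.Dict.getD, PySem.Dict.get?] at h
  | cons kv g ih =>
    obtain ⟨k1, v1⟩ := kv
    rw [pvGet_cons] at h
    rw [pvNodes_cons]
    by_cases he : k1 == k
    · rw [he, if_pos rfl] at h
      exact List.mem_append_left _ (List.mem_cons_of_mem _ h)
    · rw [Bool.not_eq_true] at he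
      rw [he] at h
      simp only [Bool.false_eq_true, if_false] at h
      exact List.mem_append_right _ (ih h)

theorem pv_pvMu_lt {graph : List (String × List String)} {n : String} {p : List String}
    (hn : n ∈ pvNodes graph) (hp : n ∉ p) : pvMu graph (p ++ [n]) < pvMu graph p := by
  apply pv_filter_len_lt (fun x => decide (x ∉ p)) (fun x => decide (x ∉ p ++ [n]))
  · intro x hx
    simp only [decide_eq_true_eq] at hx ⊢
    intro hxp; exact hx (List.mem_append_left _ hxp)
  · exact hn
  · simpa using hp
  · simp

-- literal port of A: recursive DFS with backtracking; the for-loop with early return is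
-- findSome? over the neighbor list (attach only supplies the membership fact for termination)
def dfs_find_any_path_rec (graph : List (String × List String)) (target : String)
    (start : String) (path : List String) : Option (List String) :=
  let path' := path ++ [start]
  if start = target then some path'
  else
    (pvGet graph start).attach.findSome? (fun nh =>
      if h : nh.1 ∈ path' then none    -- if neighbor not in path
      else
        match dfs_find_any_path_rec graph target nh.1 path' with
        | some r => if r.isEmpty then none else some r   -- 'if new_path:' (truthiness)
        | none => none)
termination_by pvMu graph (path ++ [start])
decreasing_by
  exact pv_pvMu_lt (pv_mem_pvGet nh.2) h

def dfs_find_any_path (graph : List (String × List String)) (start : String)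
    (target : String) (path : Option (List String)) : Option (List String) :=
  -- 'if path is None: path = []'
  dfs_find_any_path_rec graph target start (match path with | none => [] | some p => p)

-- ===== PORT B =====
-- fuel: a guard that only totalizes B's while-loop (proved never to run out below);
-- computed from the total size of the adjacency structure
def pvFuel (graph : List (String × List String)) : Nat :=
  (2 * (graph.foldr (fun kv a => 1 + kv.2.length + a) 0) + 2)
    ^ ((graph.foldr (fun kv a => 1 + kv.2.length + a) 0) + 1)

-- literal port of B's while-loop over (cur, pending): head of the Lean list = pending[-1];
-- 'ns.pop(0)' = taking the head, 'cur.pop()' = dropLast, 'pending.append' = cons on top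
def pvDfsLoop (graph : List (String × List String)) (target : String) :
    Nat → List String → List (List String) → Option (List String)
  | 0, _, _ => none
  | _ + 1, _, [] => none                              -- while pending exhausted: return None
  | f + 1, cur, [] :: rest => pvDfsLoop graph target f cur.dropLast rest
  | f + 1, cur, (n :: ms) :: rest =>
    if n ∈ cur then pvDfsLoop graph target f cur (ms :: rest)
    else if n = target then some (cur ++ [n])
    else pvDfsLoop graph target f (cur ++ [n])
           ((PySem.Dict.getD (PySem.Dict.mk graph) n []) :: ms :: rest)

def dfs_find_any_path_alt (graph : List (String × List String)) (start : String)
    (target : String) (path : Option (List String)) : Option (List String) :=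
  -- cur = (list(path) if path else []) + [start]   ('path' falsy when None or empty)
  let cur := (match path with
              | none => []
              | some p => if p.isEmpty then [] else p) ++ [start]
  if start = target then some cur
  else pvDfsLoop graph target (pvFuel graph) cur
         [PySem.Dict.getD (PySem.Dict.mk graph) start []]

-- ===== PRECONDITION & SPEC =====
def Spec_dfs_find_any_path (graph : List (String × List String)) (start : String) (target : String) (path : Option (List String)) (out : Option (List String)) : Prop := out = dfs_find_any_path_alt graph start target path
instance (graph : List (String × List String)) (start : String) (target : String) (path : Option (List String)) (out : Option (List String)) : Decidable (Spec_dfs_find_any_path graph start target path out) := by unfold Spec_dfs_find_any_path; infer_instance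

-- ===== CLAIM (what is proved, stated in full; the proofs are below) =====
def Claim_equal_dfs_find_any_path : Prop := ∀ (graph : List (String × List String)) (start : String) (target : String) (path : Option (List String)), Dom_dfs_find_any_path graph start target path → Spec_dfs_find_any_path graph start target path (dfs_find_any_path graph start target path)

-- ===== LEMMAS AND PROOFS =====

theorem pv_len_pvGet_le (graph : List (String × List String)) (k : String) :
    (pvGet graph k).length ≤ (pvNodes graph).length := by
  induction graph with
  | nil => simp [pvGet, PySem.Dict.getD, PySem.Dict.get?]
  | cons kv g ih =>
    obtain ⟨k1, v1⟩ := kv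
    rw [pvGet_cons, pvNodes_cons]
    by_cases he : k1 == k
    · rw [he, if_pos rfl]
      simp; omega
    · rw [Bool.not_eq_true] at he
      rw [he]
      simp only [Bool.false_eq_true, if_false, List.length_append, List.length_cons]
      omega

-- attach-free one-step characterization of A's recursion
theorem dfsA_unfold (graph : List (String × List String)) (target start : String) (path : List String) :
    dfs_find_any_path_rec graph target start path =
      if start = target then some (path ++ [start])
      else
        (pvGet graph start).findSome? (fun n =>
          if n ∈ path ++ [start] then none
          else
            match dfs_find_any_path_rec graph target n (path ++ [start]) with
            | some r => if r.isEmpty then none else some r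
            | none => none) := by
  rw [dfs_find_any_path_rec]
  by_cases h : start = target
  · simp [h]
  · simp only [h, if_false]
    rw [List.findSome?_subtype (fun x hx => ?_), List.unattach_attach]
    by_cases hm : x ∈ path ++ [start] <;> simp [hm]

theorem pv_findSome?_ne_nil {α : Type} (f : α → Option (List String))
    (hf : ∀ x r, f x = some r → r ≠ []) :
    ∀ (l : List α) (r : List String), l.findSome? f = some r → r ≠ [] := by
  intro l
  induction l with
  | nil => intro r h; simp at h
  | cons x xs ih =>
    intro r h
    rw [List.findSome?_cons] at h
    cases hx : f x with
    | some v => rw [hx] at h; cases h; exact hf x r hx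
    | none => rw [hx] at h; exact ih r h

theorem dfsA_ne_nil (graph : List (String × List String)) (target start : String)
    (path : List String) (r : List String)
    (h : dfs_find_any_path_rec graph target start path = some r) : r ≠ [] := by
  rw [dfsA_unfold] at h
  by_cases ht : start = target
  · rw [if_pos ht] at h
    injection h with h
    subst h
    simp
  · simp only [ht, if_false] at h
    refine pv_findSome?_ne_nil _ ?_ _ _ h
    intro x v hx
    by_cases hm : x ∈ path ++ [start]
    · simp [hm] at hx
    · simp only [hm, if_false] at hx
      cases hrec : dfs_find_any_path_rec graph target x (path ++ [start]) with
      | none => rw [hrec] at hx; simp at hx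
      | some r' =>
        rw [hrec] at hx
        simp only at hx
        by_cases he : r'.isEmpty
        · simp [he] at hx
        · simp only [he, Bool.false_eq_true, if_false, Option.some.injEq] at hx
          subst hx
          intro hv; rw [hv] at he; simp at he

theorem pv_findSome?_ext {α β : Type} (f g : α → Option β) (l : List α)
    (h : ∀ x ∈ l, f x = g x) : l.findSome? f = l.findSome? g := by
  induction l with
  | nil => simp
  | cons x xs ih =>
    rw [List.findSome?_cons, List.findSome?_cons, h x (List.mem_cons_self ..)]
    cases g x with
    | some v => rfl
    | none => exact ih (fun y hy => h y (List.mem_cons_of_mem _ hy))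

-- A's recursion with the truthiness wrapper stripped (the recursion never returns some [])
theorem dfsA_unfold' (graph : List (String × List String)) (target start : String) (path : List String) :
    dfs_find_any_path_rec graph target start path =
      if start = target then some (path ++ [start])
      else
        (pvGet graph start).findSome? (fun n =>
          if n ∈ path ++ [start] then none
          else dfs_find_any_path_rec graph target n (path ++ [start])) := by
  rw [dfsA_unfold]
  by_cases h : start = target
  · simp [h]
  · simp only [h, if_false]
    apply pv_findSome?_ext
    intro n _
    by_cases hm : n ∈ path ++ [start]
    · simp [hm]
    · simp only [hm, if_false]
      cases hrec : dfs_find_any_path_rec graph target n (path ++ [start]) with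
      | none => rfl
      | some r =>
        have : r.isEmpty = false := by
          have := dfsA_ne_nil _ _ _ _ _ hrec
          cases r with | nil => exact absurd rfl this | cons a l => simp
        simp [this]

-- reference value of B's stack state, expressed through A's recursion (proof-only)
def pvPeel (graph : List (String × List String)) (target : String) :
    List String → List (List String) → Option (List String)
  | _, [] => none
  | cur, ns :: rest =>
    (ns.findSome? (fun n =>
        if n ∈ cur then none else dfs_find_any_path_rec graph target n cur)).or
      (pvPeel graph target cur.dropLast rest)

-- potential of a stack state (proof-only): Σ (2·|frame|+1)·(N+1)^(μ of its path prefix)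
def pvMeas (graph : List (String × List String)) :
    List String → List (List String) → Nat
  | _, [] => 0
  | cur, ns :: rest =>
    (2 * ns.length + 1) * ((pvNodes graph).length + 1) ^ pvMu graph cur
      + pvMeas graph cur.dropLast rest

theorem pvLoop_eq_peel (graph : List (String × List String)) (target : String) :
    ∀ (f : Nat) (cur : List String) (pending : List (List String)),
      (∀ ns ∈ pending, ∀ x ∈ ns, x ∈ pvNodes graph) →
      pvMeas graph cur pending < f →
      pvDfsLoop graph target f cur pending = pvPeel graph target cur pending := by
  intro f
  induction f with
  | zero => intro cur pending _ h; omega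
  | succ f ih =>
    intro cur pending hinv hm
    have hBpos : 0 < (pvNodes graph).length + 1 := by omega
    cases pending with
    | nil => rfl
    | cons ns rest =>
      cases ns with
      | nil =>
        rw [pvDfsLoop, pvPeel]
        simp only [List.findSome?_nil, Option.none_or]
        apply ih _ _ (fun ns hns => hinv ns (List.mem_cons_of_mem _ hns))
        have hpow : 0 < ((pvNodes graph).length + 1) ^ pvMu graph cur := Nat.pow_pos hBpos
        rw [pvMeas] at hm
        simp only [List.length_nil] at hm
        omega
      | cons n ms =>
        rw [pvDfsLoop, pvPeel, List.findSome?_cons]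
        by_cases hn : n ∈ cur
        · simp only [hn, if_pos]
          rw [ih _ (ms :: rest) (by
            intro zs hzs x hx
            rcases List.mem_cons.mp hzs with h1 | h2
            · exact hinv (n :: ms) (List.mem_cons_self ..) x
                (by rw [h1] at hx; exact List.mem_cons_of_mem _ hx)
            · exact hinv zs (List.mem_cons_of_mem _ h2) x hx) (by
            have hpow : 0 < ((pvNodes graph).length + 1) ^ pvMu graph cur := Nat.pow_pos hBpos
            rw [pvMeas] at hm ⊢
            simp only [List.length_cons] at hm
            have hsplit : (2 * (ms.length + 1) + 1) * ((pvNodes graph).length + 1) ^ pvMu graph cur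
                = (2 * ms.length + 1) * ((pvNodes graph).length + 1) ^ pvMu graph cur
                  + 2 * ((pvNodes graph).length + 1) ^ pvMu graph cur := by ring
            omega)]
          rw [pvPeel]
        · simp only [hn, if_false]
          by_cases ht : n = target
          · subst ht
            rw [dfsA_unfold']
            simp
          · have hstep : dfs_find_any_path_rec graph target n cur
                = (pvGet graph n).findSome? (fun m =>
                    if m ∈ cur ++ [n] then none
                    else dfs_find_any_path_rec graph target m (cur ++ [n])) := by
              rw [dfsA_unfold', if_neg ht]
            have hmemn : n ∈ pvNodes graph :=
              hinv (n :: ms) (List.mem_cons_self ..) n (List.mem_cons_self ..)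
            have hmu : pvMu graph (cur ++ [n]) < pvMu graph cur := pv_pvMu_lt hmemn hn
            have hinv2 : ∀ ns ∈ pvGet graph n :: ms :: rest, ∀ x ∈ ns, x ∈ pvNodes graph := by
              intro zs hzs x hx
              rcases List.mem_cons.mp hzs with h1 | h
              · rw [h1] at hx; exact pv_mem_pvGet hx
              rcases List.mem_cons.mp h with h1 | h2
              · exact hinv (n :: ms) (List.mem_cons_self ..) x
                  (by rw [h1] at hx; exact List.mem_cons_of_mem _ hx)
              · exact hinv zs (List.mem_cons_of_mem _ h2) x hx
            have hmeas2 : pvMeas graph (cur ++ [n]) (pvGet graph n :: ms :: rest) < f := by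
              rw [pvMeas, List.dropLast_concat, pvMeas]
              rw [pvMeas] at hm
              simp only [List.length_cons] at hm
              -- new top frame weight < 2·(N+1)^μ(cur), the weight freed by consuming n
              have hA : (2 * (pvGet graph n).length + 1) ≤ 2 * (pvNodes graph).length + 1 := by
                have := pv_len_pvGet_le graph n
                omega
              have hp1 : ((pvNodes graph).length + 1) ^ pvMu graph (cur ++ [n])
                  ≤ ((pvNodes graph).length + 1) ^ (pvMu graph cur - 1) :=
                Nat.pow_le_pow_right hBpos (by omega)
              have hp2 : (2 * (pvNodes graph).length + 2) * ((pvNodes graph).length + 1) ^ (pvMu graph cur - 1)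
                  = 2 * ((pvNodes graph).length + 1) ^ pvMu graph cur := by
                conv_rhs => rw [show pvMu graph cur = (pvMu graph cur - 1) + 1 by omega]
                rw [pow_succ]; ring
              have hppos : 0 < ((pvNodes graph).length + 1) ^ (pvMu graph cur - 1) := Nat.pow_pos hBpos
              have hlt : (2 * (pvGet graph n).length + 1) * ((pvNodes graph).length + 1) ^ pvMu graph (cur ++ [n])
                  < 2 * ((pvNodes graph).length + 1) ^ pvMu graph cur := by
                calc (2 * (pvGet graph n).length + 1) * ((pvNodes graph).length + 1) ^ pvMu graph (cur ++ [n])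
                    ≤ (2 * (pvNodes graph).length + 1) * ((pvNodes graph).length + 1) ^ (pvMu graph cur - 1) :=
                      Nat.mul_le_mul hA hp1
                  _ < (2 * (pvNodes graph).length + 2) * ((pvNodes graph).length + 1) ^ (pvMu graph cur - 1) :=
                      Nat.mul_lt_mul_of_lt_of_le (by omega) (le_refl _) hppos
                  _ = 2 * ((pvNodes graph).length + 1) ^ pvMu graph cur := hp2
              have hsplit : (2 * (ms.length + 1) + 1) * ((pvNodes graph).length + 1) ^ pvMu graph cur
                  = (2 * ms.length + 1) * ((pvNodes graph).length + 1) ^ pvMu graph cur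
                    + 2 * ((pvNodes graph).length + 1) ^ pvMu graph cur := by ring
              omega
            have hadj : PySem.Dict.getD (PySem.Dict.mk graph) n [] = pvGet graph n := rfl
            rw [if_neg ht, hadj, ih _ _ hinv2 hmeas2, pvPeel, List.dropLast_concat, pvPeel, hstep]
            cases hx : (pvGet graph n).findSome? (fun m =>
                if m ∈ cur ++ [n] then none
                else dfs_find_any_path_rec graph target m (cur ++ [n])) with
            | some v => simp
            | none => simp

-- ===== VERDICT (by name: the statement is the Claim_ definition above) =====
theorem dfs_find_any_path_spec : Claim_equal_dfs_find_any_path := by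
  intro graph start target path hdom
  clear hdom
  unfold Spec_dfs_find_any_path dfs_find_any_path dfs_find_any_path_alt
  have hsize : graph.foldr (fun kv a => 1 + kv.2.length + a) 0 = (pvNodes graph).length := by
    induction graph with
    | nil => simp [pvNodes]
    | cons kv g ih => rw [List.foldr_cons, pvNodes_cons, ih]; simp; omega
  have key : ∀ p0 : List String,
      dfs_find_any_path_rec graph target start p0
        = if start = target then some (p0 ++ [start])
          else pvDfsLoop graph target (pvFuel graph) (p0 ++ [start])
                 [PySem.Dict.getD (PySem.Dict.mk graph) start []] := by
    intro p0
    by_cases ht : start = target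
    · rw [dfsA_unfold', if_pos ht, if_pos ht]
    · rw [if_neg ht]
      have hadj : PySem.Dict.getD (PySem.Dict.mk graph) start [] = pvGet graph start := rfl
      have hmufin : pvMu graph (p0 ++ [start]) ≤ (pvNodes graph).length :=
        List.length_filter_le _ _
      have hfuel : pvMeas graph (p0 ++ [start]) [pvGet graph start] < pvFuel graph := by
        rw [pvMeas, pvMeas, pvFuel, hsize]
        have hA : 2 * (pvGet graph start).length + 1 ≤ 2 * (pvNodes graph).length + 1 := by
          have := pv_len_pvGet_le graph start; omega
        have hp1 : ((pvNodes graph).length + 1) ^ pvMu graph (p0 ++ [start])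
            ≤ ((pvNodes graph).length + 1) ^ (pvNodes graph).length :=
          Nat.pow_le_pow_right (by omega) hmufin
        have hp2 : ((pvNodes graph).length + 1) ^ (pvNodes graph).length
            ≤ (2 * (pvNodes graph).length + 2) ^ (pvNodes graph).length :=
          Nat.pow_le_pow_left (by omega) (pvNodes graph).length
        have hppos : 0 < (2 * (pvNodes graph).length + 2) ^ (pvNodes graph).length :=
          Nat.pow_pos (by omega)
        calc (2 * (pvGet graph start).length + 1) * ((pvNodes graph).length + 1) ^ pvMu graph (p0 ++ [start]) + 0
            ≤ (2 * (pvNodes graph).length + 1) * (2 * (pvNodes graph).length + 2) ^ (pvNodes graph).length := by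
              have := Nat.mul_le_mul hA (le_trans hp1 hp2); omega
          _ < (2 * (pvNodes graph).length + 2) * (2 * (pvNodes graph).length + 2) ^ (pvNodes graph).length :=
              Nat.mul_lt_mul_of_lt_of_le (by omega) (le_refl _) hppos
          _ = (2 * (pvNodes graph).length + 2) ^ ((pvNodes graph).length + 1) := by rw [pow_succ]; ring
      rw [hadj, pvLoop_eq_peel graph target (pvFuel graph) (p0 ++ [start]) [pvGet graph start]
            (by intro ns hns x hx
                rcases List.mem_cons.mp hns with rfl | h
                · exact pv_mem_pvGet hx
                · cases h) hfuel]
      rw [pvPeel, pvPeel, Option.or_none, dfsA_unfold', if_neg ht]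
  cases path with
  | none =>
    have := key []
    simpa using this
  | some p =>
    cases p with
    | nil =>
      have := key []
      simpa using this
    | cons a l =>
      have := key (a :: l)
      simpa using this
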